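-- pv_equiv track=rewrite | github.com/Elleres/SourceCodeRegEx | testes.py | CombinacaoG
-- ===== SOURCE A (Python) =====
-- def Arranjo(lis):
--     # Função para utilizada na função de fazer lista de combinações possíveis da 2G
--     lista = []
--     for i in lis:
--         lista.append(i)
--         lista.append(i)
--     for i,x in enumerate(lista):
--         if i % 2 ==0:
--             lista[i] += "H"
--         else:
--             lista[i] += "M"
--     return lista
--
-- def CombinacaoG(x,y):
--     # Função que retorna a lista propriamente dita
--     listaI = ["H","M"]
--     listaF = []
--     aux = 2
--     while(aux <= y):
--         listaI = Arranjo(listaI)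
--         if aux >= x:
--             listaF += listaI
--         aux += 1
--     return listaF
-- ===== SOURCE B (Python) =====
-- def CombinacaoG(x, y):
--     # Each length-L block is generated directly by binary counting:
--     # string number n has 'M' exactly where bit (L-1-k) of n is set.
--     out = []
--     for L in range(max(2, x), y + 1):
--         for n in range(2 ** L):
--             out.append("".join("M" if (n // 2 ** (L - 1 - k)) % 2 == 1 else "H" for k in range(L)))
--     return out
-- ===== Notes on version B (the rewrite author's own statement) =====
-- stated objective: alternative
-- what changed: Replaces the Arranjo incremental list-doubling (carrying the previous generation and suffixing H/M) by direct per-length enumeration: for each L in range(max(2,x), y+1) the L-th block is produced by binary counting, reading character k of string n off bit (L-1-k) of n.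
import Mathlib
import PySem

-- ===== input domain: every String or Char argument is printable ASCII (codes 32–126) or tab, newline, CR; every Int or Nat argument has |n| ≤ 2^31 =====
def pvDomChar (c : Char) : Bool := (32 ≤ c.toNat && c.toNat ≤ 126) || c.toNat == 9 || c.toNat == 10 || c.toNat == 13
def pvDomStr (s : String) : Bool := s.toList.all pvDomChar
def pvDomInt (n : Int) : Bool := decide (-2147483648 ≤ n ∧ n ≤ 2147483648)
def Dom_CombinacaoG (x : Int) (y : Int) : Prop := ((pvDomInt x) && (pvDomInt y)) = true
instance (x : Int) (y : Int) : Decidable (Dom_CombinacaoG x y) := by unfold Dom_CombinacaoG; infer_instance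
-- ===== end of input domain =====

-- B replaces A's incremental Arranjo doubling by independent per-length binary-counting
-- enumeration (alternative algorithm, same output). Strings are carried as List Char
-- internally (exact: all characters are literal ASCII 'H'/'M') and converted at the end.

-- ===== PORT A =====
def Arranjo (lis : List (List Char)) : List (List Char) :=
  -- first loop: lista.append(i); lista.append(i)
  let lista := lis.foldl (fun acc i => acc ++ [i, i]) []
  -- second loop: writes lista[i] += "H"/"M" at the current index only, so it is the indexed map
  (PySem.List.enumerate lista).map
    (fun p => if p.1 % 2 == 0 then p.2 ++ ['H'] else p.2 ++ ['M'])

def combLoop (x y : Int) (listaI listaF : List (List Char)) (aux : Int) : List (List Char) :=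
  if aux ≤ y then
    let listaI' := Arranjo listaI
    combLoop x y listaI' (if aux ≥ x then listaF ++ listaI' else listaF) (aux + 1)
  else listaF
termination_by (y + 1 - aux).toNat
decreasing_by omega

def CombinacaoG (x : Int) (y : Int) : List String :=
  (combLoop x y [['H'], ['M']] [] 2).map String.ofList

-- ===== PORT B =====
-- block of all length-L strings, string n read off the bits of n (MSB first);
-- .toNat is exact here: bitBlock is only applied to L ≥ 2 and k ranges over 0..L-1
def bitBlock (L : Int) : List (List Char) :=
  (PySem.List.pyRange 0 (2 ^ L.toNat) 1).map (fun n =>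
    (PySem.List.pyRange 0 L 1).map (fun k =>
      if PySem.Int.mod (PySem.Int.floordiv n (2 ^ (L - 1 - k).toNat)) 2 == 1 then 'M' else 'H'))

def CombinacaoG_alt (x : Int) (y : Int) : List String :=
  (((PySem.List.pyRange (max 2 x) (y + 1) 1).foldl
      (fun out L => out ++ bitBlock L) []).map String.ofList)

-- ===== PRECONDITION & SPEC =====
def Spec_CombinacaoG (x : Int) (y : Int) (out : List String) : Prop := out = CombinacaoG_alt x y
instance (x : Int) (y : Int) (out : List String) : Decidable (Spec_CombinacaoG x y out) := by unfold Spec_CombinacaoG; infer_instance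

-- ===== CLAIM (what is proved, stated in full; the proofs are below) =====
def Claim_equal_CombinacaoG : Prop := ∀ (x : Int) (y : Int), Dom_CombinacaoG x y → Spec_CombinacaoG x y (CombinacaoG x y)

-- ===== LEMMAS AND PROOFS =====

-- the specification layer: bitStr L n = the n-th length-L string, lvl L = the length-L block
def bitStr (L n : Nat) : List Char :=
  (List.range L).map (fun k => if (n / 2 ^ (L - 1 - k)) % 2 = 1 then 'M' else 'H')

def lvl (L : Nat) : List (List Char) := (List.range (2 ^ L)).map (bitStr L)

theorem enum_dup :
    ∀ (lis : List (List Char)) (s : Int), s % 2 = 0 →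
    (PySem.List.enumerate (lis.flatMap (fun i => [i, i])) s).map
      (fun p => if p.1 % 2 == 0 then p.2 ++ ['H'] else p.2 ++ ['M'])
      = lis.flatMap (fun i => [i ++ ['H'], i ++ ['M']]) := by
  intro lis
  induction lis with
  | nil => intro s _; simp [PySem.List.enumerate_nil]
  | cons i rest ih =>
      intro s hs
      have h1 : (s % 2 == 0) = true := by simp; omega
      have h2 : ((s + 1) % 2 == 0) = false := by simp; omega
      simp only [List.flatMap_cons, List.cons_append, List.nil_append,
        PySem.List.enumerate_cons, List.map_cons, h1, h2]
      simp only [if_true, Bool.false_eq_true, if_false]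
      rw [ih (s + 1 + 1) (by omega)]

theorem arranjo_eq (lis : List (List Char)) :
    Arranjo lis = lis.flatMap (fun i => [i ++ ['H'], i ++ ['M']]) := by
  unfold Arranjo
  rw [PySem.List.foldl_append_eq_flatMap]
  simpa using enum_dup lis 0 rfl

theorem bitStr_step (L n b : Nat) (hb : b < 2) :
    bitStr (L + 1) (2 * n + b) = bitStr L n ++ [if b % 2 = 1 then 'M' else 'H'] := by
  unfold bitStr
  rw [List.range_succ, List.map_append]
  congr 1
  · apply List.map_congr_left
    intro k hk
    have hk' : k < L := List.mem_range.mp hk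
    have he : L + 1 - 1 - k = (L - 1 - k) + 1 := by omega
    have hdiv : (2 * n + b) / 2 ^ ((L - 1 - k) + 1) = n / 2 ^ (L - 1 - k) := by
      rw [pow_succ, mul_comm (2 ^ (L - 1 - k)) 2, ← Nat.div_div_eq_div_mul]
      congr 1
      omega
    rw [he, hdiv]
  · have h0 : L + 1 - 1 - L = 0 := by omega
    simp only [List.map_cons, List.map_nil, h0, pow_zero, Nat.div_one]
    have hb2 : (2 * n + b) % 2 = b % 2 := by omega
    rw [hb2]

theorem range_two_mul_flatMap (f : Nat → List Char) :
    ∀ m : Nat, (List.range (2 * m)).map f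
      = (List.range m).flatMap (fun n => [f (2 * n), f (2 * n + 1)]) := by
  intro m
  induction m with
  | zero => simp
  | succ m ih =>
      have h : 2 * (m + 1) = (2 * m + 1) + 1 := by omega
      rw [h, List.range_succ, List.range_succ, List.map_append, List.map_append,
        List.range_succ, List.flatMap_append, ← ih]
      simp

theorem lvl_step (L : Nat) :
    lvl (L + 1) = (lvl L).flatMap (fun s => [s ++ ['H'], s ++ ['M']]) := by
  unfold lvl
  rw [pow_succ, mul_comm, range_two_mul_flatMap, List.flatMap_map]
  apply List.flatMap_congr
  intro n _
  have h0 := bitStr_step L n 0 (by omega)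
  have h1 := bitStr_step L n 1 (by omega)
  simp only [Nat.add_zero] at h0
  rw [h0, h1]
  simp

theorem loop_spec (x y : Int) :
    ∀ (fuel : Nat) (L : Nat) (listaF : List (List Char)),
      fuel = (y + 1 - ((L : Int) + 2)).toNat →
      combLoop x y (lvl (L + 1)) listaF ((L : Int) + 2)
        = listaF ++ (PySem.List.pyRange (max x ((L : Int) + 2)) (y + 1) 1).flatMap
            (fun t => lvl t.toNat) := by
  intro fuel
  induction fuel with
  | zero =>
      intro L listaF hf
      have hgt : ¬ ((L : Int) + 2 ≤ y) := by omega
      rw [combLoop, if_neg hgt]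
      rw [PySem.List.pyRange_one_eq_nil (by omega)]
      simp
  | succ fuel ih =>
      intro L listaF hf
      have hle : (L : Int) + 2 ≤ y := by omega
      rw [combLoop, if_pos hle]
      have harr : Arranjo (lvl (L + 1)) = lvl (L + 1 + 1) := by
        rw [arranjo_eq]
        exact (lvl_step (L + 1)).symm
      simp only [harr]
      have hcast : ((L : Int) + 2) + 1 = ((L + 1 : Nat) : Int) + 2 := by push_cast; ring
      rw [hcast, ih (L + 1) _ (by push_cast; omega)]
      by_cases hx : (L : Int) + 2 ≥ x
      · have hm1 : max x ((L : Int) + 2) = (L : Int) + 2 := max_eq_right hx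
        have hm2 : max x (((L + 1 : Nat) : Int) + 2) = ((L : Int) + 2) + 1 := by
          rw [max_eq_right (by push_cast; omega)]
          push_cast
          ring
        rw [if_pos hx, hm2]
        conv_rhs => rw [hm1, PySem.List.pyRange_one_cons (show (L : Int) + 2 < y + 1 by omega)]
        have ht : ((L : Int) + 2).toNat = L + 2 := by omega
        simp only [List.flatMap_cons, ht, List.append_assoc]
      · rw [if_neg hx]
        have hm : max x (((L + 1 : Nat) : Int) + 2) = max x ((L : Int) + 2) := by
          rw [max_eq_left (by push_cast; omega), max_eq_left (by omega)]
        rw [hm]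

theorem bitBlock_eq (t : Int) (ht : 0 ≤ t) : bitBlock t = lvl t.toNat := by
  unfold bitBlock lvl
  have h2 : ((2 : Int) ^ t.toNat) = (((2 ^ t.toNat : Nat)) : Int) := by push_cast; ring
  have ht' : t = ((t.toNat : Nat) : Int) := by omega
  rw [h2, PySem.List.pyRange_zero_nat, List.map_map]
  apply List.map_congr_left
  intro m hm
  simp only [Function.comp_apply]
  conv_lhs => rw [ht', PySem.List.pyRange_zero_nat]
  rw [List.map_map]
  unfold bitStr
  apply List.map_congr_left
  intro k hk
  have hk' : k < t.toNat := List.mem_range.mp hk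
  simp only [Function.comp_apply]
  have he : (((t.toNat : Nat) : Int) - 1 - ((k : Nat) : Int)).toNat = t.toNat - 1 - k := by omega
  rw [he]
  have hp : ((2 : Int) ^ (t.toNat - 1 - k)) = (((2 ^ (t.toNat - 1 - k) : Nat)) : Int) := by
    push_cast; ring
  rw [hp, PySem.Int.floordiv_natCast,
    PySem.Int.mod_eq_emod_of_pos (by norm_num : (0 : Int) < 2)]
  by_cases hone : m / 2 ^ (t.toNat - 1 - k) % 2 = 1
  · have h1 : (((m / 2 ^ (t.toNat - 1 - k) : Nat) : Int) % 2 == 1) = true := by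
      rw [beq_iff_eq]
      exact_mod_cast hone
    rw [h1, if_pos hone]
    simp
  · have h1 : (((m / 2 ^ (t.toNat - 1 - k) : Nat) : Int) % 2 == 1) = false := by
      simp only [beq_eq_false_iff_ne, ne_eq]
      exact fun hc => hone (by exact_mod_cast hc)
    rw [h1, if_neg hone]
    simp

-- ===== VERDICT (by name: the statement is the Claim_ definition above) =====
theorem CombinacaoG_spec : Claim_equal_CombinacaoG := by
  intro x y _
  unfold Spec_CombinacaoG CombinacaoG CombinacaoG_alt
  have hl1 : lvl 1 = [['H'], ['M']] := by decide
  have hspec := loop_spec x y (y + 1 - (((0 : Nat) : Int) + 2)).toNat 0 [] rfl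
  norm_num at hspec
  rw [← hl1, hspec, PySem.List.foldl_append_eq_flatMap, max_comm 2 x]
  congr 1
  apply List.flatMap_congr
  intro t htmem
  have ht : 0 ≤ t := by
    have := (PySem.List.mem_pyRange_one.mp htmem).1
    omega
  rw [bitBlock_eq t ht]
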